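-- pv_equiv track=rewrite | github.com/KaiStarkk/scope-spider | backend/domain/utils/verification.py | _detect_scope2_method
-- ===== SOURCE A (Python) =====
-- from typing import Any, Optional
--
-- _METHOD_HINTS = (
--     ("market-based", "market"),
--     ("market based", "market"),
--     ("market", "market"),
--     ("location-based", "location"),
--     ("location based", "location"),
--     ("locational", "location"),
--     ("location", "location"),
-- )
--
-- def _detect_scope2_method(context: Optional[str]) -> Optional[str]:
--     if not context:
--         return None
--     lowered = context.lower()
--     for hint, mapped in _METHOD_HINTS:
--         if hint in lowered:
--             return mapped
--     return None
-- ===== SOURCE B (Python) =====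
-- from typing import Optional
--
-- def _detect_scope2_method(context: Optional[str]) -> Optional[str]:
--     if not context:
--         return None
--     lowered = context.lower()
--     if "market" in lowered:
--         return "market"
--     if "location" in lowered:
--         return "location"
--     return None
-- ===== Notes on version B (the rewrite author's own statement) =====
-- stated objective: simpler
-- what changed: Replaced the seven-entry hint table and its lookup loop by two direct priority-ordered substring tests, since every table hint is a superstring of the short key word it maps to, so matching the two key words directly gives the same result.
import Mathlib
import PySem

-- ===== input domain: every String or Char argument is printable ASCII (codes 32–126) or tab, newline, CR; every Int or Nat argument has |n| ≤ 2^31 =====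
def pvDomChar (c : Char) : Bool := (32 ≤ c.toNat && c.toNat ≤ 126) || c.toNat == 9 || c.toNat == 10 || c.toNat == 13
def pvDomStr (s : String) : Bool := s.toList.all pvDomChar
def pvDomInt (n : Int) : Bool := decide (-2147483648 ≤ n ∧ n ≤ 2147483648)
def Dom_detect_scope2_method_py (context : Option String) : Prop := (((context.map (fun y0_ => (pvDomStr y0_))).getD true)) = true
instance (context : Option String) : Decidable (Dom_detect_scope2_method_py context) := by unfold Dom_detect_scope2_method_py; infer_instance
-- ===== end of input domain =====

-- B replaces the 7-entry hint table and its loop by two direct substring tests; objective: simpler.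

-- ===== PORT A =====
def pvMethodHints : List (String × String) :=
  [("market-based", "market"), ("market based", "market"), ("market", "market"),
   ("location-based", "location"), ("location based", "location"),
   ("locational", "location"), ("location", "location")]

def pvFindHint : List (String × String) → String → Option String
  | [], _ => none
  | (hint, mapped) :: rest, lowered =>
    if PySem.Str.isIn hint lowered then some mapped else pvFindHint rest lowered

def detect_scope2_method_py (context : Option String) : Option String :=
  match context with
  | none => none
  | some s =>
    if s = "" then none
    else pvFindHint pvMethodHints (PySem.Str.lower s)

-- ===== PORT B =====
def detect_scope2_method_py_alt (context : Option String) : Option String :=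
  match context with
  | none => none
  | some s =>
    if s = "" then none
    else
      let lowered := PySem.Str.lower s
      if PySem.Str.isIn "market" lowered then some "market"
      else if PySem.Str.isIn "location" lowered then some "location"
      else none

-- ===== PRECONDITION & SPEC =====
def Spec_detect_scope2_method_py (context : Option String) (out : Option String) : Prop := out = detect_scope2_method_py_alt context
instance (context : Option String) (out : Option String) : Decidable (Spec_detect_scope2_method_py context out) := by unfold Spec_detect_scope2_method_py; infer_instance

-- ===== CLAIM (what is proved, stated in full; the proofs are below) =====
def Claim_equal_detect_scope2_method_py : Prop := ∀ (context : Option String), Dom_detect_scope2_method_py context → Spec_detect_scope2_method_py context (detect_scope2_method_py context)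

-- ===== LEMMAS AND PROOFS =====

-- If a is a substring of b and a does not occur in s, then b does not occur in s.
lemma isIn_false_mono (a b s : String) (h : a.toList <:+: b.toList)
    (ha : PySem.Str.isIn a s = false) : PySem.Str.isIn b s = false := by
  rw [← Bool.not_eq_true] at ha ⊢
  simp only [PySem.Str.isIn_iff_infix] at ha ⊢
  exact fun hb => ha (h.trans hb)

-- ===== VERDICT (by name: the statement is the Claim_ definition above) =====
theorem detect_scope2_method_py_spec : Claim_equal_detect_scope2_method_py := by
  intro context _
  unfold Spec_detect_scope2_method_py detect_scope2_method_py detect_scope2_method_py_alt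
  cases context with
  | none => rfl
  | some s =>
    by_cases hs : s = ""
    · simp [hs]
    · simp only [if_neg hs]
      generalize PySem.Str.lower s = L
      simp only [pvMethodHints, pvFindHint]
      cases hm : PySem.Str.isIn "market" L with
      | true => simp only [hm]; split_ifs <;> rfl
      | false =>
        have h1 : PySem.Str.isIn "market-based" L = false :=
          isIn_false_mono _ _ _ (by decide) hm
        have h2 : PySem.Str.isIn "market based" L = false :=
          isIn_false_mono _ _ _ (by decide) hm
        simp only [hm, h1, h2, if_false, Bool.false_eq_true]
        cases hl : PySem.Str.isIn "location" L with
        | true => simp only [hl]; split_ifs <;> rfl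
        | false =>
          have h4 : PySem.Str.isIn "location-based" L = false :=
            isIn_false_mono _ _ _ (by decide) hl
          have h5 : PySem.Str.isIn "location based" L = false :=
            isIn_false_mono _ _ _ (by decide) hl
          have h6 : PySem.Str.isIn "locational" L = false :=
            isIn_false_mono _ _ _ (by decide) hl
          simp only [h4, h5, h6, Bool.false_eq_true, if_false]
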